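-- pv_equiv track=rewrite | github.com/CALettuce/trigram-generator | app.py | generar_trigramas
-- ===== SOURCE A (Python) =====
-- def generar_trigramas(texto, eliminar_duplicados=False):
--     if not texto:
--         return ""
--
--     texto = texto.upper()
--     trigramas = set() if eliminar_duplicados else []
--
--     palabras = [p for p in texto.split() if len(p) >= 3]
--
--     if not palabras:
--         texto_sin_espacios = texto.replace(" ", "").strip()
--         for i in range(len(texto_sin_espacios) - 2):
--             trig = texto_sin_espacios[i:i+3]
--             if eliminar_duplicados:
--                 trigramas.add(trig)
--             else:
--                 trigramas.append(trig)
--     else: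
--         for palabra in palabras:
--             for i in range(len(palabra) - 2):
--                 trig = palabra[i:i+3]
--                 if eliminar_duplicados:
--                     trigramas.add(trig)
--                 else:
--                     trigramas.append(trig)
--
--     return " ".join(sorted(trigramas)) if eliminar_duplicados else " ".join(trigramas)
-- ===== SOURCE B (Python) =====
-- def generar_trigramas(texto, eliminar_duplicados=False):
--     if not texto:
--         return ""
--     texto = texto.upper()
--     # single streaming pass: rolling 3-char window, reset at whitespace
--     trigs = []
--     buf = ""
--     for c in texto:
--         if c.isspace():
--             buf = ""
--         else:
--             buf = (buf + c)[-3:]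
--             if len(buf) == 3:
--                 trigs.append(buf)
--     if not trigs:
--         # no word long enough: roll over the space-stripped text without resets
--         buf = ""
--         for c in texto.replace(" ", "").strip():
--             buf = (buf + c)[-3:]
--             if len(buf) == 3:
--                 trigs.append(buf)
--     if eliminar_duplicados:
--         return " ".join(sorted(set(trigs)))
--     return " ".join(trigs)
-- ===== Notes on version B (the rewrite author's own statement) =====
-- stated objective: alternative
-- what changed: B replaces A's split-into-words-then-slice-each-word construction by a single streaming pass over the characters with a rolling 3-char window that resets at whitespace (windows never re-sliced from the words), with the dedup/sort decision taken once at the end instead of A's per-element add/append branching.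
import Mathlib
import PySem

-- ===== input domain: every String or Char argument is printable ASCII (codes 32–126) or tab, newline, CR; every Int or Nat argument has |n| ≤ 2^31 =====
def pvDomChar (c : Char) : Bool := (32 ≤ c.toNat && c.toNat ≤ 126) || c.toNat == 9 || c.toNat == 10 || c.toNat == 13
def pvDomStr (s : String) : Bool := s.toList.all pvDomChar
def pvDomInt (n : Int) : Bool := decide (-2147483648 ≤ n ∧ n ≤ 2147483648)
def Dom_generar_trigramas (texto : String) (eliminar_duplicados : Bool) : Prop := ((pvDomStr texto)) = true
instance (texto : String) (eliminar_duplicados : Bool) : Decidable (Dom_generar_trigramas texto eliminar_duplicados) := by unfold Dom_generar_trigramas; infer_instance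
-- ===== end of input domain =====

-- B replaces A's split-words-then-slice construction by a single streaming pass with a rolling
-- 3-char window (reset at whitespace), deduplicating once at the end (objective: alternative).

-- ===== PORT A =====
def generar_trigramas (texto : String) (eliminar_duplicados : Bool) : String :=
  if texto = "" then "" else
  let texto := PySem.Str.upper texto
  let palabras := (PySem.Str.split₀ texto).filter (fun p => 3 ≤ PySem.Str.len p)
  let trigramas : List String :=
    if palabras = [] then
      let texto_sin_espacios := PySem.Str.strip (PySem.Str.replace texto " " "")
      (PySem.List.pyRange 0 ((PySem.Str.len texto_sin_espacios : Int) - 2) 1).foldl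
        (fun acc i =>
          let trig := PySem.Str.slice texto_sin_espacios (some i) (some (i + 3))
          if eliminar_duplicados then PySem.Set.add acc trig else acc ++ [trig]) []
    else
      palabras.foldl (fun acc palabra =>
        (PySem.List.pyRange 0 ((PySem.Str.len palabra : Int) - 2) 1).foldl
          (fun acc i =>
            let trig := PySem.Str.slice palabra (some i) (some (i + 3))
            if eliminar_duplicados then PySem.Set.add acc trig else acc ++ [trig]) acc) []
  if eliminar_duplicados then
    PySem.Str.join " " (PySem.List.sorted trigramas (fun x => x) false)
  else
    PySem.Str.join " " trigramas

-- ===== PORT B =====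
-- one step of Source B's main loop: reset the rolling buffer at whitespace, else slide it
-- (buf = (buf + c)[-3:]) and emit the window once it is full
def pvStepMain (st : List String × List Char) (c : Char) : List String × List Char :=
  if PySem.Chars.isspace c then (st.1, [])
  else
    let buf := PySem.List.slice (st.2 ++ [c]) (some (-3)) none
    (if buf.length == 3 then st.1 ++ [String.ofList buf] else st.1, buf)

-- one step of Source B's fallback loop: same sliding window, no whitespace reset
def pvStepRoll (st : List String × List Char) (c : Char) : List String × List Char :=
  let buf := PySem.List.slice (st.2 ++ [c]) (some (-3)) none
  (if buf.length == 3 then st.1 ++ [String.ofList buf] else st.1, buf)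

def generar_trigramas_alt (texto : String) (eliminar_duplicados : Bool) : String :=
  if texto = "" then "" else
  let texto := PySem.Str.upper texto
  let main := texto.toList.foldl pvStepMain ([], [])
  let trigs :=
    if main.1 = [] then
      ((PySem.Str.strip (PySem.Str.replace texto " " "")).toList.foldl pvStepRoll ([], [])).1
    else main.1
  if eliminar_duplicados then
    PySem.Str.join " " (PySem.List.sorted (PySem.Set.ofList trigs) (fun x => x) false)
  else
    PySem.Str.join " " trigs

-- ===== PRECONDITION & SPEC =====
def Spec_generar_trigramas (texto : String) (eliminar_duplicados : Bool) (out : String) : Prop := out = generar_trigramas_alt texto eliminar_duplicados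
instance (texto : String) (eliminar_duplicados : Bool) (out : String) : Decidable (Spec_generar_trigramas texto eliminar_duplicados out) := by unfold Spec_generar_trigramas; infer_instance

-- ===== CLAIM (what is proved, stated in full; the proofs are below) =====
def Claim_equal_generar_trigramas : Prop := ∀ (texto : String) (eliminar_duplicados : Bool), Dom_generar_trigramas texto eliminar_duplicados → Spec_generar_trigramas texto eliminar_duplicados (generar_trigramas texto eliminar_duplicados)

-- ===== LEMMAS AND PROOFS =====

-- the list of 3-char windows of a char list (specification device for both proofs)
def pvWin3 : List Char → List (List Char)
  | a :: b :: c :: r => [a, b, c] :: pvWin3 (b :: c :: r)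
  | _ => []

theorem pvWin3_nil : pvWin3 [] = [] := rfl

theorem pvWin3_nil_of_short (s : List Char) (h : s.length ≤ 2) : pvWin3 s = [] := by
  match s with
  | [] => rfl
  | [_] => rfl
  | [_, _] => rfl
  | _ :: _ :: _ :: _ => simp at h

theorem pvWin3_eq_nil_iff (s : List Char) : pvWin3 s = [] ↔ s.length ≤ 2 := by
  constructor
  · intro h
    match s with
    | [] => simp
    | [_] => simp
    | [_, _] => simp
    | _ :: _ :: _ :: _ => simp [pvWin3] at h
  · exact pvWin3_nil_of_short s

-- unfolding equations for split₀.go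
theorem pv_go_nil (cur : List Char) (acc : List (List Char)) :
    PySem.Chars.split₀.go [] cur acc
      = if cur.isEmpty then acc.reverse else (cur.reverse :: acc).reverse := rfl

theorem pv_go_cons (c : Char) (r cur : List Char) (acc : List (List Char)) :
    PySem.Chars.split₀.go (c :: r) cur acc
      = if PySem.Chars.isspace c then
          (if cur.isEmpty then PySem.Chars.split₀.go r [] acc
           else PySem.Chars.split₀.go r [] (cur.reverse :: acc))
        else PySem.Chars.split₀.go r (c :: cur) acc := rfl

-- xs[-3:] is "keep the last three"
theorem pv_slice_neg3 (xs : List Char) :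
    PySem.List.slice xs (some (-3)) none = xs.drop (xs.length - 3) :=
  PySem.List.slice_from_neg_ofNat xs 3 (by norm_num)

-- the rolling buffer after reading c from buffer (p.take 3).reverse
theorem pv_buf_update (p : List Char) (c : Char) :
    ((p.take 3).reverse ++ [c]).drop (((p.take 3).reverse ++ [c]).length - 3)
      = ((c :: p).take 3).reverse := by
  match p with
  | [] => rfl
  | [_] => rfl
  | [_, _] => rfl
  | _ :: _ :: _ :: _ => simp [List.take_succ_cons]

theorem pv_take3_cons (p : List Char) (c : Char) :
    ((c :: p).take 3).reverse = (p.take 2).reverse ++ [c] := by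
  simp [List.take_succ_cons]

-- one pvStepRoll step from a coherent buffer
theorem pv_roll_step (ts : List String) (p : List Char) (c : Char) :
    pvStepRoll (ts, (p.take 3).reverse) c
      = (if 2 ≤ p.length then ts ++ [String.ofList (((c :: p).take 3).reverse)] else ts,
         ((c :: p).take 3).reverse) := by
  unfold pvStepRoll
  rw [pv_slice_neg3, pv_buf_update]
  have hlen : (((c :: p).take 3).reverse).length = min 3 (p.length + 1) := by
    simp; omega
  by_cases hp : 2 ≤ p.length
  · have hb : ((((c :: p).take 3).reverse).length == 3) = true := by
      rw [hlen]; simp; omega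
    simp only [hb, if_pos hp, if_true]
  · have hb : ((((c :: p).take 3).reverse).length == 3) = false := by
      rw [hlen]; simp; omega
    simp only [hb, if_neg hp, Bool.false_eq_true, if_false]

-- the fallback loop from buffer (p.take 3).reverse emits exactly the windows that end in r
theorem pv_roll_spec (r : List Char) (p : List Char) (ts : List String) :
    (r.foldl pvStepRoll (ts, (p.take 3).reverse)).1
      = ts ++ (pvWin3 ((p.take 2).reverse ++ r)).map String.ofList := by
  induction r generalizing p ts with
  | nil =>
      simp [pvWin3_nil_of_short ((p.take 2).reverse) (by simp)]
  | cons c r ih =>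
      rw [List.foldl_cons, pv_roll_step]
      by_cases hp : 2 ≤ p.length
      · rw [if_pos hp, ih (c :: p), pv_take3_cons]
        match p, hp with
        | a :: b :: p', _ =>
          simp [pvWin3, List.take_succ_cons]
      · rw [if_neg hp, ih (c :: p)]
        rcases p with _ | ⟨a, _ | ⟨b, p⟩⟩
        · simp [List.take_succ_cons]
        · simp [List.take_succ_cons]
        · exact absurd (by simp) hp

-- one pvStepMain step on a non-space char is a pvStepRoll step
theorem pv_main_step_nonspace (st : List String × List Char) (c : Char)
    (h : PySem.Chars.isspace c = false) : pvStepMain st c = pvStepRoll st c := by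
  unfold pvStepMain pvStepRoll; rw [h]; simp

-- split₀.go with accumulator
theorem pv_goAcc (r : List Char) (cur : List Char) (acc : List (List Char)) :
    PySem.Chars.split₀.go r cur acc = acc.reverse ++ PySem.Chars.split₀.go r cur [] := by
  induction r generalizing cur acc with
  | nil =>
      by_cases h : cur.isEmpty <;> simp [pv_go_nil, h]
  | cons c r ih =>
      rw [pv_go_cons, pv_go_cons]
      by_cases hs : PySem.Chars.isspace c
      · rw [if_pos hs, if_pos hs]
        by_cases hc : cur.isEmpty
        · rw [if_pos hc, if_pos hc]
          exact ih [] acc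
        · rw [if_neg hc, if_neg hc]
          rw [ih [] (cur.reverse :: acc), ih [] [cur.reverse]]
          simp
      · rw [if_neg hs, if_neg hs]
        exact ih (c :: cur) acc

-- peeling the first word off split₀.go
theorem pv_go_flat (r : List Char) (cur : List Char) :
    (PySem.Chars.split₀.go r cur []).flatMap pvWin3
      = pvWin3 (cur.reverse ++ r.takeWhile (fun c => !PySem.Chars.isspace c))
        ++ (PySem.Chars.split₀.go (r.dropWhile (fun c => !PySem.Chars.isspace c)) [] []).flatMap pvWin3 := by
  induction r generalizing cur with
  | nil =>
      by_cases hc : cur.isEmpty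
      · have hcur : cur = [] := by simpa [List.isEmpty_iff] using hc
        simp [pv_go_nil, hcur]
        exact pvWin3_nil
      · simp [pv_go_nil, hc]
  | cons c r ih =>
      by_cases hs : PySem.Chars.isspace c
      · have htw : List.takeWhile (fun c => !PySem.Chars.isspace c) (c :: r) = [] := by
          simp [hs]
        have hdw : List.dropWhile (fun c => !PySem.Chars.isspace c) (c :: r) = c :: r := by
          simp [hs]
        rw [htw, hdw]
        by_cases hc : cur.isEmpty
        · have hcur : cur = [] := by simpa [List.isEmpty_iff] using hc
          rw [hcur]
          simp
          exact pvWin3_nil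
        · rw [pv_go_cons, if_pos hs, if_neg hc, pv_goAcc r [] [cur.reverse]]
          rw [pv_go_cons, if_pos hs, if_pos (by rfl)]
          simp
      · have htw : List.takeWhile (fun c => !PySem.Chars.isspace c) (c :: r)
            = c :: List.takeWhile (fun c => !PySem.Chars.isspace c) r := by
          simp [hs]
        have hdw : List.dropWhile (fun c => !PySem.Chars.isspace c) (c :: r)
            = List.dropWhile (fun c => !PySem.Chars.isspace c) r := by
          simp [hs]
        rw [htw, hdw, pv_go_cons, if_neg hs, ih (c :: cur)]
        simp

-- the main loop from buffer (cur.take 3).reverse emits the remaining windows of the word structure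
theorem pv_main_spec (r : List Char) (cur : List Char) (ts : List String) :
    (r.foldl pvStepMain (ts, (cur.take 3).reverse)).1
      = ts ++ ((pvWin3 ((cur.take 2).reverse ++ r.takeWhile (fun c => !PySem.Chars.isspace c))
          ++ (PySem.Chars.split₀.go (r.dropWhile (fun c => !PySem.Chars.isspace c)) [] []).flatMap pvWin3).map String.ofList) := by
  induction r generalizing cur ts with
  | nil =>
      simp [pvWin3_nil_of_short ((cur.take 2).reverse) (by simp), pv_go_nil]
  | cons c r ih =>
      by_cases hs : PySem.Chars.isspace c
      · rw [List.foldl_cons]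
        have hst : pvStepMain (ts, (cur.take 3).reverse) c = (ts, (([] : List Char).take 3).reverse) := by
          unfold pvStepMain; simp [hs]
        rw [hst, ih []]
        have hdw : List.dropWhile (fun c => !PySem.Chars.isspace c) (c :: r) = c :: r := by
          simp [hs]
        have htw : List.takeWhile (fun c => !PySem.Chars.isspace c) (c :: r) = [] := by
          simp [hs]
        rw [htw, hdw, pv_go_cons, if_pos hs, if_pos (by rfl), pv_go_flat r []]
        simp [pvWin3_nil_of_short ((cur.take 2).reverse) (by simp)]
      · rw [List.foldl_cons, pv_main_step_nonspace _ _ (by simpa using hs), pv_roll_step]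
        have htw : List.takeWhile (fun c => !PySem.Chars.isspace c) (c :: r)
            = c :: List.takeWhile (fun c => !PySem.Chars.isspace c) r := by
          simp [hs]
        have hdw : List.dropWhile (fun c => !PySem.Chars.isspace c) (c :: r)
            = List.dropWhile (fun c => !PySem.Chars.isspace c) r := by
          simp [hs]
        rw [htw, hdw]
        by_cases hp : 2 ≤ cur.length
        · rw [if_pos hp, ih (c :: cur), pv_take3_cons]
          match cur, hp with
          | a :: b :: p', _ =>
            simp [pvWin3, List.take_succ_cons]
        · rw [if_neg hp, ih (c :: cur)]
          rcases cur with _ | ⟨a, _ | ⟨b, cur⟩⟩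
          · simp [List.take_succ_cons]
          · simp [List.take_succ_cons]
          · exact absurd (by simp) hp

-- B's main scan computes the flat window list of split₀
theorem pv_scan_eq_flat (t : List Char) :
    (t.foldl pvStepMain ([], [])).1
      = ((PySem.Chars.split₀ t).flatMap pvWin3).map String.ofList := by
  have h0 : (([] : List String), ([] : List Char)) = (([] : List String), ((([] : List Char)).take 3).reverse) := rfl
  rw [h0, pv_main_spec t [] [], PySem.Chars.split₀]
  rw [pv_go_flat t []]
  simp

-- A's per-word slice loop is the window list of the word
theorem pv_word_windows (s : List Char) :
    (PySem.List.pyRange 0 ((s.length : Int) - 2) 1).map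
        (fun i => PySem.List.slice s (some i) (some (i + 3))) = pvWin3 s := by
  match s with
  | [] => rfl
  | [_] => rfl
  | [_, _] => rfl
  | a :: b :: d :: s' =>
      have ih := pv_word_windows (b :: d :: s')
      have hlen : ((a :: b :: d :: s').length : Int) - 2 = (s'.length : Int) + 1 := by
        simp; omega
      have hlen' : ((b :: d :: s').length : Int) - 2 = (s'.length : Int) := by
        simp; omega
      rw [hlen]
      rw [hlen'] at ih
      have hpos : (0 : Int) < (s'.length : Int) + 1 := by positivity
      rw [PySem.List.pyRange_one_cons hpos, List.map_cons]
      have hhead : PySem.List.slice (a :: b :: d :: s') (some 0) (some (0 + 3)) = [a, b, d] := by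
        have h03 : ((0 : Int) + 3) = ((3 : Nat) : Int) := by norm_num
        have h00 : ((0 : Int)) = ((0 : Nat) : Int) := by norm_num
        rw [h03, h00, PySem.List.slice_natCast]
        rfl
      have htail : (PySem.List.pyRange (0 + 1) ((s'.length : Int) + 1) 1).map
            (fun i => PySem.List.slice (a :: b :: d :: s') (some i) (some (i + 3)))
          = (PySem.List.pyRange 0 (s'.length : Int) 1).map
            (fun i => PySem.List.slice (b :: d :: s') (some i) (some (i + 3))) := by
        rw [PySem.List.pyRange_one, PySem.List.pyRange_one]
        have he : (((s'.length : Int) + 1) - (0 + 1)).toNat = ((s'.length : Int) - 0).toNat := by omega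
        rw [he, List.map_map, List.map_map]
        apply List.map_congr_left
        intro k _
        show PySem.List.slice (a :: b :: d :: s') (some (0 + 1 + k)) (some (0 + 1 + k + 3))
            = PySem.List.slice (b :: d :: s') (some (0 + k)) (some (0 + k + 3))
        have e1 : (0 : Int) + 1 + (k : Int) = ((k + 1 : Nat) : Int) := by push_cast; ring
        have e2 : (0 : Int) + 1 + (k : Int) + 3 = ((k + 4 : Nat) : Int) := by push_cast; ring
        have e3 : (0 : Int) + (k : Int) = ((k : Nat) : Int) := by omega
        have e4 : (0 : Int) + (k : Int) + 3 = ((k + 3 : Nat) : Int) := by push_cast; ring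
        rw [e2, e1, e4, e3, PySem.List.slice_natCast, PySem.List.slice_natCast]
        have : k + 4 - (k + 1) = 3 := by omega
        rw [this]
        have : k + 3 - k = 3 := by omega
        rw [this]
        rfl
      rw [hhead, htail, ih]
      rfl

theorem pv_word_windows_str (w : String) :
    (PySem.List.pyRange 0 ((PySem.Str.len w : Int) - 2) 1).map
        (fun i => PySem.Str.slice w (some i) (some (i + 3)))
      = (pvWin3 w.toList).map String.ofList := by
  have hlen : (PySem.Str.len w : Int) = (w.toList.length : Int) := by
    simp
  have hsl : (fun i => PySem.Str.slice w (some i) (some (i + 3)))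
      = (fun i => String.ofList (PySem.List.slice w.toList (some i) (some (i + 3)))) := by
    funext i
    simp [PySem.Str.slice]
  rw [hlen, hsl]
  have h := congrArg (List.map String.ofList) (pv_word_windows w.toList)
  rw [List.map_map] at h
  exact h

theorem pv_filter_flat (l : List String) :
    ((l.filter (fun w => 3 ≤ PySem.Str.len w)).flatMap (fun w => (pvWin3 w.toList).map String.ofList))
      = l.flatMap (fun w => (pvWin3 w.toList).map String.ofList) := by
  induction l with
  | nil => rfl
  | cons w l ih =>
      by_cases hw : 3 ≤ PySem.Str.len w
      · rw [List.filter_cons, if_pos (by simpa using hw), List.flatMap_cons, ih, List.flatMap_cons]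
      · have hwin : pvWin3 w.toList = [] := by
          apply pvWin3_nil_of_short
          have : PySem.Str.len w = w.toList.length := by simp
          omega
        rw [List.filter_cons, if_neg (by simpa using hw), ih, List.flatMap_cons, hwin]
        simp

-- folding per-word batches of Set.add over A's word list = one Set.add fold over the flat list
theorem pv_nested_add {α β : Type} [BEq β] (xs : List α) (m : α → List β) (s : PySem.Set β) :
    xs.foldl (fun acc p => List.foldl PySem.Set.add acc (m p)) s
      = List.foldl PySem.Set.add s (xs.flatMap m) := by
  induction xs generalizing s with
  | nil => simp
  | cons x xs ih => rw [List.foldl_cons, ih, List.flatMap_cons, List.foldl_append]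

-- A's flat trigram list (over the length-filtered words) is B's scan output
theorem pv_A_flat_eq_scan (t : String) :
    ((PySem.Str.split₀ t).filter (fun p => 3 ≤ PySem.Str.len p)).flatMap
        (fun w => (PySem.List.pyRange 0 ((PySem.Str.len w : Int) - 2) 1).map
          (fun i => PySem.Str.slice w (some i) (some (i + 3))))
      = (t.toList.foldl pvStepMain ([], [])).1 := by
  rw [pv_scan_eq_flat]
  have h1 : ∀ w : String, (PySem.List.pyRange 0 ((PySem.Str.len w : Int) - 2) 1).map
        (fun i => PySem.Str.slice w (some i) (some (i + 3)))
      = (pvWin3 w.toList).map String.ofList := pv_word_windows_str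
  rw [List.flatMap_congr (fun w _ => h1 w), pv_filter_flat]
  rw [← PySem.Str.split₀_map_toList, List.flatMap_map, List.map_flatMap]

-- A's branch condition agrees with B's
theorem pv_cond_iff (t : String) :
    ((PySem.Str.split₀ t).filter (fun p => 3 ≤ PySem.Str.len p) = [])
      ↔ ((t.toList.foldl pvStepMain ([], [])).1 = []) := by
  rw [pv_scan_eq_flat, ← PySem.Str.split₀_map_toList, List.flatMap_map]
  rw [List.map_eq_nil_iff, List.flatMap_eq_nil_iff, List.filter_eq_nil_iff]
  constructor
  · intro h w hw
    have := h w hw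
    rw [pvWin3_eq_nil_iff]
    simp at this ⊢
    omega
  · intro h w hw
    have := h w hw
    rw [pvWin3_eq_nil_iff] at this
    simp at this ⊢
    omega

-- the fallback loop computes the slice windows of the stripped text
theorem pv_fallback_eq (q : String) :
    (q.toList.foldl pvStepRoll ([], [])).1
      = (PySem.List.pyRange 0 ((PySem.Str.len q : Int) - 2) 1).map
          (fun i => PySem.Str.slice q (some i) (some (i + 3))) := by
  rw [pv_word_windows_str]
  have h := pv_roll_spec q.toList [] []
  simpa using h

-- ===== VERDICT (by name: the statement is the Claim_ definition above) =====
theorem generar_trigramas_spec : Claim_equal_generar_trigramas := by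
  intro texto dup _
  unfold Spec_generar_trigramas generar_trigramas generar_trigramas_alt
  by_cases h0 : texto = ""
  · simp [h0]
  simp only [h0, if_false]
  generalize PySem.Str.upper texto = t
  by_cases hps : (PySem.Str.split₀ t).filter (fun p => 3 ≤ PySem.Str.len p) = []
  · -- fallback branch on both sides
    have hmain : (t.toList.foldl pvStepMain ([], [])).1 = [] := (pv_cond_iff t).mp hps
    simp only [hps, hmain]
    generalize PySem.Str.strip (PySem.Str.replace t " " "") = q
    rw [pv_fallback_eq q]
    cases dup
    · simp only [Bool.false_eq_true, if_false]
      rw [PySem.List.foldl_append_singleton_eq_map]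
      simp
    · simp only [if_true]
      rw [← PySem.Set.update_map_eq_foldl_add, PySem.Set.update, ← PySem.Set.ofList_eq_foldl]
  · -- main branch on both sides
    have hmain : ¬ (t.toList.foldl pvStepMain ([], [])).1 = [] := fun h => hps ((pv_cond_iff t).mpr h)
    simp only [hps, hmain]
    rw [← pv_A_flat_eq_scan t]
    simp only [if_false]
    generalize (PySem.Str.split₀ t).filter (fun p => 3 ≤ PySem.Str.len p) = ps
    cases dup
    · simp only [Bool.false_eq_true, if_false]
      have : ∀ w : String, (PySem.List.pyRange 0 ((PySem.Str.len w : Int) - 2) 1).foldl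
            (fun acc i => acc ++ [PySem.Str.slice w (some i) (some (i + 3))]) = fun acc => acc ++
            (PySem.List.pyRange 0 ((PySem.Str.len w : Int) - 2) 1).map (fun i => PySem.Str.slice w (some i) (some (i + 3))) := by
        intro w; funext acc; rw [PySem.List.foldl_append_singleton_eq_map]
      simp only [PySem.List.foldl_append_singleton_eq_map]
      rw [PySem.List.foldl_append_eq_flatMap]
      simp
    · simp only [if_true]
      have hinner : ∀ (acc : PySem.Set String) (palabra : String),
          (PySem.List.pyRange 0 ((PySem.Str.len palabra : Int) - 2) 1).foldl
            (fun acc i => PySem.Set.add acc (PySem.Str.slice palabra (some i) (some (i + 3)))) acc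
          = List.foldl PySem.Set.add acc
              ((PySem.List.pyRange 0 ((PySem.Str.len palabra : Int) - 2) 1).map
                (fun i => PySem.Str.slice palabra (some i) (some (i + 3)))) := by
        intro acc w
        rw [← PySem.Set.update_map_eq_foldl_add, PySem.Set.update]
      simp only [hinner]
      rw [pv_nested_add, ← PySem.Set.ofList_eq_foldl]
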